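-- pv_equiv track=rewrite | github.com/SantiagoGuali/realSecurity-installer | functions/load_camera4.py | validar_micro_movimientos
-- ===== SOURCE A (Python) =====
-- def validar_micro_movimientos(historial_posiciones, threshold):
--     if len(historial_posiciones) < 2:
--         return False
--     xs = [pos[0] for pos in historial_posiciones]
--     ys = [pos[1] for pos in historial_posiciones]
--     movimiento_x = max(xs) - min(xs)
--     movimiento_y = max(ys) - min(ys)
--     return (movimiento_x >= threshold) or (movimiento_y >= threshold)
-- ===== SOURCE B (Python) =====
-- def validar_micro_movimientos(historial_posiciones, threshold):
--     if len(historial_posiciones) < 2: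
--         return False
--     xs = sorted(pos[0] for pos in historial_posiciones)
--     ys = sorted(pos[1] for pos in historial_posiciones)
--     return xs[-1] - xs[0] >= threshold or ys[-1] - ys[0] >= threshold
-- ===== Notes on version B (the rewrite author's own statement) =====
-- stated objective: alternative
-- what changed: Replaces the max/min extrema scans with sorting each coordinate list and taking the spread as last-minus-first element of the sorted list.
import Mathlib
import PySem

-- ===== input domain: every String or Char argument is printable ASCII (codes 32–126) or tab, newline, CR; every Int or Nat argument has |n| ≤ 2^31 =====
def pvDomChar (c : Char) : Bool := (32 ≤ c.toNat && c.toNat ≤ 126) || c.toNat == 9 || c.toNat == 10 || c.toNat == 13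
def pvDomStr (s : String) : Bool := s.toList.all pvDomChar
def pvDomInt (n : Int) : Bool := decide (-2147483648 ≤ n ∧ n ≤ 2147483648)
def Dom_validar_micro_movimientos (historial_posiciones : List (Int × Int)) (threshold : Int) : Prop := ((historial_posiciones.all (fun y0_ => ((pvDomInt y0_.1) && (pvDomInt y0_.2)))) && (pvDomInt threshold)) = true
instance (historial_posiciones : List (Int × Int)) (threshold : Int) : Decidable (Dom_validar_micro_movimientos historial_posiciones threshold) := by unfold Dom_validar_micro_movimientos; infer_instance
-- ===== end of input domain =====

-- B computes each coordinate spread by sorting the coordinate list and subtracting its first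
-- element from its last, instead of A's max/min extrema scans (objective: alternative).

-- ===== PORT A =====
def validar_micro_movimientos (historial_posiciones : List (Int × Int)) (threshold : Int) : Bool :=
  if historial_posiciones.length < 2 then false
  else
    let xs := historial_posiciones.map (fun pos => pos.1)
    let ys := historial_posiciones.map (fun pos => pos.2)
    match PySem.List.max? xs (fun x => x), PySem.List.min? xs (fun x => x),
          PySem.List.max? ys (fun x => x), PySem.List.min? ys (fun x => x) with
    | some mxx, some mnx, some mxy, some mny =>
        decide (mxx - mnx ≥ threshold) || decide (mxy - mny ≥ threshold)
    | _, _, _, _ => false   -- unreachable: length ≥ 2 means the lists are nonempty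

-- ===== PORT B =====
def validar_micro_movimientos_alt (historial_posiciones : List (Int × Int)) (threshold : Int) : Bool :=
  if historial_posiciones.length < 2 then false
  else
    let xs := PySem.List.sorted (historial_posiciones.map (fun pos => pos.1)) (fun x => x) false
    let ys := PySem.List.sorted (historial_posiciones.map (fun pos => pos.2)) (fun x => x) false
    -- the four indexings, nested; the 'none' arms are unreachable (length ≥ 2 ⇒ nonempty sorted lists)
    match PySem.List.pyGet? xs (-1) with
    | none => false
    | some xl =>
      match PySem.List.pyGet? xs 0 with
      | none => false
      | some xf =>
        match PySem.List.pyGet? ys (-1) with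
        | none => false
        | some yl =>
          match PySem.List.pyGet? ys 0 with
          | none => false
          | some yf => decide (xl - xf ≥ threshold) || decide (yl - yf ≥ threshold)

-- ===== PRECONDITION & SPEC =====
def Spec_validar_micro_movimientos (historial_posiciones : List (Int × Int)) (threshold : Int) (out : Bool) : Prop := out = validar_micro_movimientos_alt historial_posiciones threshold
instance (historial_posiciones : List (Int × Int)) (threshold : Int) (out : Bool) : Decidable (Spec_validar_micro_movimientos historial_posiciones threshold out) := by unfold Spec_validar_micro_movimientos; infer_instance

-- ===== CLAIM (what is proved, stated in full; the proofs are below) =====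
def Claim_equal_validar_micro_movimientos : Prop := ∀ (historial_posiciones : List (Int × Int)) (threshold : Int), Dom_validar_micro_movimientos historial_posiciones threshold → Spec_validar_micro_movimientos historial_posiciones threshold (validar_micro_movimientos historial_posiciones threshold)

-- ===== LEMMAS AND PROOFS =====
-- In a ≤-pairwise list every element is ≤ the last element.
theorem pairwise_le_getLast (l : List Int) (h : l ≠ []) (hp : l.Pairwise (· ≤ ·)) :
    ∀ y ∈ l, y ≤ l.getLast h := by
  induction l with
  | nil => cases h rfl
  | cons a t ih =>
    intro y hy
    rcases List.pairwise_cons.1 hp with ⟨ha, hpt⟩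
    cases t with
    | nil => simp at hy; simp [hy]
    | cons b s =>
      rw [List.getLast_cons (by simp)]
      rcases List.mem_cons.1 hy with h | h
      · exact h ▸ ha _ (List.getLast_mem _)
      · exact ih (by simp) hpt y h

-- Head of the sorted list is min(l).
theorem sorted_head?_eq_min? (l : List Int) :
    (PySem.List.sorted l (fun x => x) false).head? = PySem.List.min? l (fun x => x) := by
  cases hl : PySem.List.sorted l (fun x => x) false with
  | nil =>
    have : l = [] := by
      have := PySem.List.sorted_perm l (fun x => x) false
      rw [hl] at this; exact this.symm.eq_nil
    subst this; rfl
  | cons m t =>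
    have hmem : m ∈ l := by
      rw [← PySem.List.mem_sorted l (fun x => x) false, hl]; simp
    cases hmn : PySem.List.min? l (fun x => x) with
    | none =>
      rw [PySem.List.min?_eq_none_iff] at hmn
      simp [hmn] at hmem
    | some mn =>
      have h1 : mn ≤ m := PySem.List.min?_isMin hmn m hmem
      have h2 : m ≤ mn :=
        PySem.List.key_head_sorted_le l (fun x => x) hl mn (PySem.List.min?_mem hmn)
      simp [le_antisymm h1 h2]

-- Last element of the sorted list is max(l).
theorem sorted_getLast?_eq_max? (l : List Int) :
    (PySem.List.sorted l (fun x => x) false).getLast? = PySem.List.max? l (fun x => x) := by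
  cases hl : PySem.List.sorted l (fun x => x) false with
  | nil =>
    have : l = [] := by
      have := PySem.List.sorted_perm l (fun x => x) false
      rw [hl] at this; exact this.symm.eq_nil
    subst this; rfl
  | cons m t =>
    have hne : (m :: t) ≠ [] := by simp
    have hlast_mem : (m :: t).getLast hne ∈ l := by
      rw [← PySem.List.mem_sorted l (fun x => x) false, hl]
      exact List.getLast_mem hne
    cases hmx : PySem.List.max? l (fun x => x) with
    | none =>
      rw [PySem.List.max?_eq_none_iff] at hmx
      simp [hmx] at hlast_mem
    | some mx =>
      have hp : (m :: t).Pairwise (fun a b : Int => a ≤ b) := by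
        have := PySem.List.sorted_pairwise l (fun x => x)
        rwa [hl] at this
      have hmx_mem : mx ∈ (m :: t) := by
        rw [← hl]
        rw [PySem.List.mem_sorted l (fun x => x) false]
        exact PySem.List.max?_mem hmx
      have h1 : mx ≤ (m :: t).getLast hne := pairwise_le_getLast _ hne hp mx hmx_mem
      have h2 : (m :: t).getLast hne ≤ mx := PySem.List.max?_isMax hmx _ hlast_mem
      rw [List.getLast?_eq_some_getLast hne]
      simp [le_antisymm h1 h2]

theorem validar_micro_movimientos_eq (historial_posiciones : List (Int × Int)) (threshold : Int) :
    validar_micro_movimientos historial_posiciones threshold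
      = validar_micro_movimientos_alt historial_posiciones threshold := by
  match historial_posiciones with
  | [] => rfl
  | [_] => rfl
  | p :: q :: r =>
    unfold validar_micro_movimientos validar_micro_movimientos_alt
    have hlen : ¬ (p :: q :: r).length < 2 := by simp
    simp only [if_neg hlen]
    have hx := sorted_head?_eq_min? ((p :: q :: r).map (fun pos => pos.1))
    have hy := sorted_head?_eq_min? ((p :: q :: r).map (fun pos => pos.2))
    have hx' := sorted_getLast?_eq_max? ((p :: q :: r).map (fun pos => pos.1))
    have hy' := sorted_getLast?_eq_max? ((p :: q :: r).map (fun pos => pos.2))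
    rw [PySem.List.pyGet?_neg_one, PySem.List.pyGet?_neg_one, PySem.List.pyGet?_zero,
        PySem.List.pyGet?_zero, hx', hy']
    rw [← List.head?_eq_getElem?, ← List.head?_eq_getElem?, hx, hy]
    cases hmx : PySem.List.min? ((p :: q :: r).map (fun pos => pos.1)) (fun x => x) with
    | none => rw [PySem.List.min?_eq_none_iff] at hmx; simp at hmx
    | some a =>
    cases hmy : PySem.List.min? ((p :: q :: r).map (fun pos => pos.2)) (fun x => x) with
    | none => rw [PySem.List.min?_eq_none_iff] at hmy; simp at hmy
    | some b =>
    cases hMx : PySem.List.max? ((p :: q :: r).map (fun pos => pos.1)) (fun x => x) with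
    | none => simp [PySem.List.max?_eq_none_iff] at hMx
    | some c =>
    cases hMy : PySem.List.max? ((p :: q :: r).map (fun pos => pos.2)) (fun x => x) with
    | none => simp [PySem.List.max?_eq_none_iff] at hMy
    | some d => rfl

-- ===== VERDICT (by name: the statement is the Claim_ definition above) =====
theorem validar_micro_movimientos_spec : Claim_equal_validar_micro_movimientos := by
  intro hp th _
  unfold Spec_validar_micro_movimientos
  exact (validar_micro_movimientos_eq hp th)
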